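-- pv_equiv track=rewrite | github.com/caillotantoine/smallKittiViewer | utils.py | sumENrel
-- ===== SOURCE A (Python) =====
-- def sumENrel(ENrel):
--     cumENrel = []
--     cumENrel.append([0, 0])
--     r = range(0, len(ENrel)-1)
--     for i in r:
--         p = cumENrel[i]
--         cumENrel.append([p[0]+ENrel[i][0], p[1]+ENrel[i][1]])
--     return cumENrel
-- ===== SOURCE B (Python) =====
-- def sumENrel(ENrel):
--     # the cumulative list always starts at the origin; entry i (i >= 1) is the
--     # coordinate-wise sum of the slice ENrel[:i], recomputed from scratch per index
--     return [[0, 0]] + [[sum(e[0] for e in ENrel[:i]),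
--                         sum(e[1] for e in ENrel[:i])] for i in range(1, len(ENrel))]
-- ===== Notes on version B (the rewrite author's own statement) =====
-- stated objective: alternative
-- what changed: Replaced A's single carry loop that appends to and re-indexes its own output list with a stateless per-index recomputation: the origin entry plus, for each index i, sum(ENrel[:i]) computed from scratch (nested passes, no accumulator).
import Mathlib
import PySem

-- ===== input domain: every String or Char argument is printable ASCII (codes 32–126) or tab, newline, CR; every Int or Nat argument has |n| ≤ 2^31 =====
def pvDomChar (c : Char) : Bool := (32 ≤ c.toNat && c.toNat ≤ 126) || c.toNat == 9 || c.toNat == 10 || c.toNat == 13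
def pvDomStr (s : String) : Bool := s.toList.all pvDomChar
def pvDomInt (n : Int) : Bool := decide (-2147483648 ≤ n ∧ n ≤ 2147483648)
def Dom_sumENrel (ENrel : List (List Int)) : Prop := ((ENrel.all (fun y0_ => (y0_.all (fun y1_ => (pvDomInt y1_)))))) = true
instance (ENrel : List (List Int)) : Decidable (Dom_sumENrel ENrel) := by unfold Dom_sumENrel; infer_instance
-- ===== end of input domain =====

-- B replaces A's stateful carry loop with a stateless per-index recomputation
-- (origin entry plus, for each i, the coordinate-wise sum of ENrel[:i]); objective: alternative.

-- ===== PORT A =====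
-- for i in range(0, len(ENrel)-1): p = cumENrel[i]; cumENrel.append([p[0]+ENrel[i][0], p[1]+ENrel[i][1]])
def sumENrel (ENrel : List (List Int)) : List (List Int) :=
  (PySem.List.pyRange 0 ((ENrel.length : Int) - 1) 1).foldl
    (fun cum i =>
      let p := PySem.List.pyGetD cum i []
      let e := PySem.List.pyGetD ENrel i []
      cum ++ [[PySem.List.pyGetD p 0 0 + PySem.List.pyGetD e 0 0,
               PySem.List.pyGetD p 1 0 + PySem.List.pyGetD e 1 0]])
    [[0, 0]]

-- ===== PORT B =====
-- [[0,0]] + [[sum(e[0] for e in ENrel[:i]), sum(e[1] for e in ENrel[:i])] for i in range(1, len(ENrel))]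
def sumENrel_alt (ENrel : List (List Int)) : List (List Int) :=
  [[0, 0]] ++ (PySem.List.pyRange 1 (ENrel.length : Int) 1).map (fun i =>
    [((PySem.List.slice ENrel none (some i)).map (fun e => PySem.List.pyGetD e 0 0)).sum,
     ((PySem.List.slice ENrel none (some i)).map (fun e => PySem.List.pyGetD e 1 0)).sum])

-- ===== PRECONDITION & SPEC =====
-- Python A raises IndexError (ENrel[i][1]) when any row other than the last has fewer than
-- two entries; B raises there too, so exactly those inputs are excluded.
def Pre_sumENrel (ENrel : List (List Int)) : Prop :=
  ∀ e ∈ ENrel.dropLast, 2 ≤ e.length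
instance (ENrel : List (List Int)) : Decidable (Pre_sumENrel ENrel) := by
  unfold Pre_sumENrel; infer_instance
def pvWitness_sumENrel : List (List Int) := [[1, 2], [3, 4]]

def Spec_sumENrel (ENrel : List (List Int)) (out : List (List Int)) : Prop := out = sumENrel_alt ENrel
instance (ENrel : List (List Int)) (out : List (List Int)) : Decidable (Spec_sumENrel ENrel out) := by unfold Spec_sumENrel; infer_instance

-- ===== CLAIM (what is proved, stated in full; the proofs are below) =====
def Claim_equal_sumENrel : Prop := ∀ (ENrel : List (List Int)), Dom_sumENrel ENrel → Pre_sumENrel ENrel → Spec_sumENrel ENrel (sumENrel ENrel)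

-- ===== LEMMAS AND PROOFS =====

-- Proof-side bridge: the pairwise scan A computes.
def pvScan (pairs : List (List Int)) (cx cy : Int) : List (List Int) :=
  match pairs with
  | [] => [[cx, cy]]
  | p :: rest =>
      [cx, cy] :: pvScan rest (cx + PySem.List.pyGetD p 0 0) (cy + PySem.List.pyGetD p 1 0)

-- Loop invariant for A: after processing indices [0, k), the accumulator is the scan of the
-- first k rows; folding the remaining indices appends the recursive scan of the remaining rows.
theorem sumENrel_loop (ENrel : List (List Int)) :
    ∀ (m k : Nat) (acc : List (List Int)) (cx cy : Int),
      k + m = ENrel.length - 1 →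
      acc.length = k + 1 →
      PySem.List.pyGetD acc (k : Int) [] = [cx, cy] →
      (PySem.List.pyRange (k : Int) ((ENrel.length : Int) - 1) 1).foldl
        (fun cum i =>
          let p := PySem.List.pyGetD cum i []
          let e := PySem.List.pyGetD ENrel i []
          cum ++ [[PySem.List.pyGetD p 0 0 + PySem.List.pyGetD e 0 0,
                   PySem.List.pyGetD p 1 0 + PySem.List.pyGetD e 1 0]]) acc
        = acc.dropLast ++ pvScan (ENrel.dropLast.drop k) cx cy := by
  intro m
  induction m with
  | zero =>
      intro k acc cx cy hkm hlen hget
      have hempty : PySem.List.pyRange (k : Int) ((ENrel.length : Int) - 1) 1 = [] := by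
        simp [PySem.List.pyRange]; omega
      have hdrop : ENrel.dropLast.drop k = [] := by
        apply List.drop_eq_nil_of_le
        simp [List.length_dropLast]; omega
      have hk : k < acc.length := by omega
      have hgetE : acc[k] = [cx, cy] := by
        rw [PySem.List.pyGetD_natCast, List.getD_eq_getElem _ _ hk] at hget; exact hget
      have hacc : acc.dropLast ++ [[cx, cy]] = acc := by
        have hne : acc ≠ [] := by intro h; simp [h] at hlen
        have : acc.getLast hne = [cx, cy] := by
          rw [List.getLast_eq_getElem]
          have : acc.length - 1 = k := by omega
          simp [this, hgetE]
        conv_rhs => rw [← List.dropLast_concat_getLast hne]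
        rw [this]
      rw [hempty, hdrop]
      simpa [pvScan] using hacc.symm
  | succ m ih =>
      intro k acc cx cy hkm hlen hget
      have hlen1 : 1 ≤ ENrel.length := by omega
      have hkInt : (k : Int) < (ENrel.length : Int) - 1 := by omega
      rw [PySem.List.pyRange_one_cons hkInt]
      have hkE : k < ENrel.length := by omega
      have hE : PySem.List.pyGetD ENrel (k : Int) [] = ENrel[k] := by
        rw [PySem.List.pyGetD_natCast, List.getD_eq_getElem _ _ hkE]
      set e := ENrel[k] with he
      set ex := PySem.List.pyGetD e 0 0 with hex
      set ey := PySem.List.pyGetD e 1 0 with hey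
      have hstep :
          (fun cum i =>
            let p := PySem.List.pyGetD cum i []
            let eL := PySem.List.pyGetD ENrel i []
            cum ++ [[PySem.List.pyGetD p 0 0 + PySem.List.pyGetD eL 0 0,
                     PySem.List.pyGetD p 1 0 + PySem.List.pyGetD eL 1 0]]) acc (k : Int)
          = acc ++ [[cx + ex, cy + ey]] := by
        simp only [hget, hE, ← hex, ← hey]
        norm_num [PySem.List.pyGetD, PySem.List.pyIdx?]
      have hcast : (k : Int) + 1 = ((k + 1 : Nat) : Int) := by push_cast; ring
      have hlen' : (acc ++ [[cx + ex, cy + ey]]).length = (k + 1) + 1 := by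
        simp [hlen]
      have hget' : PySem.List.pyGetD (acc ++ [[cx + ex, cy + ey]]) ((k + 1 : Nat) : Int) []
          = [cx + ex, cy + ey] := by
        have hk1 : k + 1 < (acc ++ [[cx + ex, cy + ey]]).length := by omega
        rw [PySem.List.pyGetD_natCast, List.getD_eq_getElem _ _ hk1]
        simp [List.getElem_append_right, hlen]
      have := ih (k + 1) (acc ++ [[cx + ex, cy + ey]]) (cx + ex) (cy + ey)
        (by omega) hlen' hget'
      simp only [List.foldl_cons, hstep, hcast, this]
      have hdropAcc : (acc ++ [[cx + ex, cy + ey]]).dropLast = acc := by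
        simp
      have hkd : k < ENrel.dropLast.length := by
        simp [List.length_dropLast]; omega
      have hdropk : ENrel.dropLast.drop k = e :: ENrel.dropLast.drop (k + 1) := by
        rw [List.drop_eq_getElem_cons hkd]
        congr 1
        rw [List.getElem_dropLast]
      have hacc : acc.dropLast ++ [[cx, cy]] = acc := by
        have hk : k < acc.length := by omega
        have hgetE : acc[k] = [cx, cy] := by
          rw [PySem.List.pyGetD_natCast, List.getD_eq_getElem _ _ hk] at hget; exact hget
        have hne : acc ≠ [] := by intro h; simp [h] at hlen
        have hlast : acc.getLast hne = [cx, cy] := by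
          rw [List.getLast_eq_getElem]
          have : acc.length - 1 = k := by omega
          simp [this, hgetE]
        conv_rhs => rw [← List.dropLast_concat_getLast hne]
        rw [hlast]
      rw [hdropAcc, hdropk]
      simp only [pvScan, ← hex, ← hey]
      rw [hacc.symm]
      simp

-- A equals the pairwise scan of ENrel[:-1] (on every input).
theorem sumENrel_eq_scan (ENrel : List (List Int)) :
    sumENrel ENrel = pvScan ENrel.dropLast 0 0 := by
  unfold sumENrel
  have h := sumENrel_loop ENrel (ENrel.length - 1) 0 [[0, 0]] 0 0
    (by omega) (by simp) (by decide)
  simpa using h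

-- The pairwise scan written as per-index sums of prefixes.
theorem pvScan_eq_map (body : List (List Int)) :
    ∀ (cx cy : Int),
      pvScan body cx cy
        = (List.range (body.length + 1)).map (fun k =>
            [cx + ((body.take k).map (fun e => PySem.List.pyGetD e 0 0)).sum,
             cy + ((body.take k).map (fun e => PySem.List.pyGetD e 1 0)).sum]) := by
  induction body with
  | nil => intro cx cy; simp [pvScan]
  | cons p rest ih =>
      intro cx cy
      rw [List.range_succ_eq_map]
      simp only [pvScan, List.map_cons, List.take_zero, List.map_nil, List.sum_nil,
        add_zero, List.map_map]
      rw [ih]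
      congr 1
      apply List.map_congr_left
      intro k _
      simp [List.take_succ_cons, add_assoc]

-- B equals the per-index sums of prefixes of ENrel over indices 0..len-1 (0 giving [0,0]).
theorem sumENrel_alt_eq_map (ENrel : List (List Int)) :
    sumENrel_alt ENrel
      = [[0, 0]] ++ (List.range (ENrel.length - 1)).map (fun k =>
          [((ENrel.take (k + 1)).map (fun e => PySem.List.pyGetD e 0 0)).sum,
           ((ENrel.take (k + 1)).map (fun e => PySem.List.pyGetD e 1 0)).sum]) := by
  unfold sumENrel_alt
  rw [PySem.List.pyRange_one]
  have htn : ((ENrel.length : Int) - 1).toNat = ENrel.length - 1 := by omega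
  rw [htn]
  simp only [List.map_map]
  congr 1
  apply List.map_congr_left
  intro k _
  simp only [Function.comp_apply]
  have hc : (1 : Int) + (k : Nat) = ((k + 1 : Nat) : Int) := by push_cast; ring
  rw [hc, PySem.List.slice_to_natCast]

-- take k of dropLast = take k of the list, for k < length.
theorem take_dropLast_eq (xs : List (List Int)) (k : Nat) (hk : k < xs.length) :
    xs.dropLast.take k = xs.take k := by
  rw [List.dropLast_eq_take, List.take_take]
  congr 1
  omega

-- ===== VERDICT (by name: the statement is the Claim_ definition above) =====
theorem sumENrel_spec : Claim_equal_sumENrel := by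
  intro ENrel _ _
  show _ = _
  rw [sumENrel_eq_scan, sumENrel_alt_eq_map, pvScan_eq_map]
  have hd : ENrel.dropLast.length = ENrel.length - 1 := List.length_dropLast
  rw [hd, List.range_succ_eq_map]
  simp only [List.map_cons, List.take_zero, List.map_nil, List.sum_nil, add_zero,
    List.map_map, List.singleton_append]
  congr 1
  apply List.map_congr_left
  intro k hk
  have hk' : k + 1 < ENrel.length := by
    have := List.mem_range.mp hk; omega
  simp only [Function.comp_apply]
  rw [take_dropLast_eq ENrel (k + 1) hk']
  simp
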